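-- pv_equiv track=rewrite | github.com/koii-network/prometheus-beta | src/near_palindrome_pairs.py | find_near_palindrome_pairs
-- ===== SOURCE A (Python) =====
-- def find_near_palindrome_pairs(strings):
--     """
--     Find pairs of strings that are close to being palindromes.
--
--     A string is close to being a palindrome if it differs from a palindrome
--     by only one character.
--
--     Args:
--         strings (list): A list of strings to check for near-palindrome pairs.
--
--     Returns:
--         list: A list of pairs of strings that are close to being palindromes.
--
--     Examples:
--         >>> find_near_palindrome_pairs(["racecar", "radar", "hello", "world"])
--         [["racecar", "radar"]]
--     """
--     def is_near_palindrome(s):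
--         """
--         Check if a string is near a palindrome.
--
--         A string is near a palindrome if it can become a palindrome
--         by changing exactly one character.
--
--         Args:
--             s (str): The string to check.
--
--         Returns:
--             bool: True if the string is near a palindrome, False otherwise.
--         """
--         # Already a palindrome
--         if s == s[::-1]:
--             return False
--
--         # Try to find if the string is one character change away from a palindrome
--         n = len(s)
--
--         # If length is even
--         if n % 2 == 0:
--             # Split into two equal halves
--             first_half = s[:n//2]
--             second_half = s[n//2:]
--
--             # Reverse and compare
--             if first_half == second_half[::-1]:
--                 return False
--
--             # If almost a palindrome
--             for i in range(n):
--                 # Try removing or changing this character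
--                 modified = s[:i] + s[i+1:]
--                 if modified == modified[::-1]:
--                     return True
--
--         # If length is odd
--         else:
--             # Split into two parts around middle character
--             first_half = s[:n//2]
--             second_half = s[n//2+1:]
--
--             # See if reversing and ignoring middle matches
--             if first_half == second_half[::-1]:
--                 return False
--
--             # If almost a palindrome
--             for i in range(n):
--                 # Try removing or changing this character
--                 modified = s[:i] + s[i+1:]
--                 if modified == modified[::-1]:
--                     return True
--
--         return False
--
--     # Find pairs of near-palindromes
--     near_palindrome_pairs = []
--
--     # Check all pairs of strings
--     for i in range(len(strings)):
--         for j in range(i+1, len(strings)):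
--             # Check if both are near palindromes
--             if is_near_palindrome(strings[i]) and is_near_palindrome(strings[j]):
--                 near_palindrome_pairs.append([strings[i], strings[j]])
--
--     return near_palindrome_pairs
-- ===== SOURCE B (Python) =====
-- def find_near_palindrome_pairs(strings):
--     """Pairs of near-palindromes: two-pointer one-deletion check, predicate evaluated once per string."""
--     def is_near_palindrome(s):
--         if s == s[::-1]:
--             return False
--         l, r = 0, len(s) - 1
--         while s[l] == s[r]:
--             l += 1
--             r -= 1
--         a = s[l + 1:r + 1]
--         b = s[l:r]
--         return a == a[::-1] or b == b[::-1]
--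
--     near = [s for s in strings if is_near_palindrome(s)]
--     return [[near[i], near[j]] for i in range(len(near)) for j in range(i + 1, len(near))]
-- ===== Notes on version B (the rewrite author's own statement) =====
-- stated objective: faster
-- what changed: is_near_palindrome now uses the two-pointer 'palindrome after one deletion' check (find the first mismatch, test the two candidate deletions) instead of trying every single-character deletion, and the pair list is built from the once-computed filtered list of near-palindromes instead of re-evaluating the predicate inside the quadratic pair loop.
import Mathlib
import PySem

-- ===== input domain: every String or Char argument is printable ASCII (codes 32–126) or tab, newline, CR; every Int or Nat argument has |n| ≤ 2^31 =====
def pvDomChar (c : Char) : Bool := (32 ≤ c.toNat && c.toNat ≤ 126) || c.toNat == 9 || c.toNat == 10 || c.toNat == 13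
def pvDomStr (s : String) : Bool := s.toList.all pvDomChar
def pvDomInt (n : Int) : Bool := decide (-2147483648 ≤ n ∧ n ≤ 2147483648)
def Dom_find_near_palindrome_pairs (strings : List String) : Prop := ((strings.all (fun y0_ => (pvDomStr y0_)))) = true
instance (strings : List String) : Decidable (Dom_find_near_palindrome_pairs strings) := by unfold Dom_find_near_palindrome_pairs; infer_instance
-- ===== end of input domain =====

-- B replaces A's try-every-deletion near-palindrome test by the two-pointer first-mismatch
-- check and computes the predicate once per string instead of once per pair (objective: faster).

-- ===== PORT A =====
-- A's inner helper is_near_palindrome; s[::-1] is ported as .reverse (exact by PySem.List.slice?_none_none_neg_one)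
def pvIsNearA (s : String) : Bool :=
  let cs := s.toList
  if cs == cs.reverse then false
  else
    let n : Int := cs.length
    if PySem.Int.mod n 2 == 0 then
      let fh := PySem.List.slice cs none (some (PySem.Int.floordiv n 2))
      let sh := PySem.List.slice cs (some (PySem.Int.floordiv n 2)) none
      if fh == sh.reverse then false
      else
        (PySem.List.pyRange 0 n 1).any (fun i =>
          let m := PySem.List.slice cs none (some i) ++ PySem.List.slice cs (some (i+1)) none
          m == m.reverse)
    else
      let fh := PySem.List.slice cs none (some (PySem.Int.floordiv n 2))
      let sh := PySem.List.slice cs (some (PySem.Int.floordiv n 2 + 1)) none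
      if fh == sh.reverse then false
      else
        (PySem.List.pyRange 0 n 1).any (fun i =>
          let m := PySem.List.slice cs none (some i) ++ PySem.List.slice cs (some (i+1)) none
          m == m.reverse)

def find_near_palindrome_pairs (strings : List String) : List (List String) :=
  let n : Int := strings.length
  (PySem.List.pyRange 0 n 1).foldl (fun acc i =>
    (PySem.List.pyRange (i+1) n 1).foldl (fun acc2 j =>
      if pvIsNearA (PySem.List.pyGetD strings i "") && pvIsNearA (PySem.List.pyGetD strings j "")
      then acc2 ++ [[PySem.List.pyGetD strings i "", PySem.List.pyGetD strings j ""]]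
      else acc2) acc) []

-- ===== PORT B =====
-- the while loop 'while s[l]==s[r]: l+=1; r-=1'; the l<r guard only makes the recursion total,
-- every state Python reaches has l<r (the string is not a palindrome when called)
def pvFindB (cs : List Char) (l r : Int) : Int × Int :=
  if l < r then
    if PySem.List.pyGetD cs l ' ' == PySem.List.pyGetD cs r ' ' then pvFindB cs (l+1) (r-1)
    else (l, r)
  else (l, r)
termination_by (r - l).toNat
decreasing_by omega

-- B's is_near_palindrome; s[::-1] ported as .reverse (exact by PySem.List.slice?_none_none_neg_one)
def pvIsNearB (s : String) : Bool :=
  let cs := s.toList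
  if cs == cs.reverse then false
  else
    let lr := pvFindB cs 0 ((cs.length : Int) - 1)
    let a := PySem.List.slice cs (some (lr.1 + 1)) (some (lr.2 + 1))
    let b := PySem.List.slice cs (some lr.1) (some lr.2)
    (a == a.reverse) || (b == b.reverse)

def find_near_palindrome_pairs_alt (strings : List String) : List (List String) :=
  let near := strings.filter pvIsNearB
  let m : Int := near.length
  (PySem.List.pyRange 0 m 1).flatMap (fun i =>
    (PySem.List.pyRange (i+1) m 1).map (fun j =>
      [PySem.List.pyGetD near i "", PySem.List.pyGetD near j ""]))

-- ===== PRECONDITION & SPEC =====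
def Spec_find_near_palindrome_pairs (strings : List String) (out : List (List String)) : Prop := out = find_near_palindrome_pairs_alt strings
instance (strings : List String) (out : List (List String)) : Decidable (Spec_find_near_palindrome_pairs strings out) := by unfold Spec_find_near_palindrome_pairs; infer_instance

-- ===== CLAIM (what is proved, stated in full; the proofs are below) =====
def Claim_equal_find_near_palindrome_pairs : Prop := ∀ (strings : List String), Dom_find_near_palindrome_pairs strings → Spec_find_near_palindrome_pairs strings (find_near_palindrome_pairs strings)

-- ===== LEMMAS AND PROOFS =====

-- deleting one character leaves a palindrome (A's loop, list form)
def pvDelPal (cs : List Char) : Prop := ∃ i < cs.length, cs.eraseIdx i = (cs.eraseIdx i).reverse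

-- head-recursive pair builder used to align both outer loops
def pvTails {γ : Type} (F : String → List String → List γ) : List String → List γ
  | [] => []
  | x :: t => F x t ++ pvTails F t

-- any list of length ≥ 2 splits as first ++ middle ++ last
lemma pv_two_split (cs : List Char) (h : 2 ≤ cs.length) : ∃ c m c', cs = c :: m ++ [c'] := by
  cases cs with
  | nil => simp at h
  | cons c t =>
    rcases List.eq_nil_or_concat t with rfl | ⟨m, c', rfl⟩
    · simp at h
    · exact ⟨c, m, c', by simp⟩

-- palindromicity of a wrapped list
lemma pv_pal_wrap (c : Char) (m : List Char) :
    (c :: m ++ [c] = (c :: m ++ [c]).reverse) ↔ (m = m.reverse) := by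
  simp [List.reverse_append]

lemma pv_getD_wrap (c c' : Char) (m : List Char) (j : Nat) (hj : j < m.length) (d : Char) :
    (c :: m ++ [c']).getD (j+1) d = m.getD j d := by
  rw [List.getD_eq_getElem?_getD, List.getElem?_append_left (by simp; omega),
    List.getElem?_cons_succ, List.getD_eq_getElem?_getD]

lemma pv_getD_wrap_last (c c' : Char) (m : List Char) (d : Char) :
    (c :: m ++ [c']).getD (m.length + 1) d = c' := by
  rw [List.getD_eq_getElem?_getD, List.getElem?_append_right (by simp)]
  simp

-- pointwise symmetry of a palindrome
lemma pv_pal_getD (cs : List Char) (h : cs = cs.reverse) (j : Nat) (hj : j < cs.length) (d : Char) :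
    cs.getD j d = cs.getD (cs.length - 1 - j) d := by
  rw [List.getD_eq_getElem?_getD, List.getD_eq_getElem?_getD]
  have hrev : cs.reverse[j]? = cs[cs.length - 1 - j]? := List.getElem?_reverse (by omega)
  conv_lhs => rw [h]
  rw [hrev]

-- a non-palindrome has a mismatch in its left half
lemma pv_mismatch_of_not_pal (cs : List Char) (h : ¬ cs = cs.reverse) :
    ∃ k, k < cs.length - 1 - k ∧ cs.getD k ' ' ≠ cs.getD (cs.length - 1 - k) ' ' := by
  by_contra hc
  push Not at hc
  apply h
  have hp : ∀ j, j < cs.length → cs.getD j ' ' = cs.getD (cs.length - 1 - j) ' ' := by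
    intro j hj
    rcases lt_trichotomy j (cs.length - 1 - j) with hlt | heq | hgt
    · exact hc j hlt
    · conv_lhs => rw [heq]
    · have h2 := hc (cs.length - 1 - j) (by omega)
      have e : cs.length - 1 - (cs.length - 1 - j) = j := by omega
      rw [e] at h2
      exact h2.symm
  apply List.ext_getElem (by simp)
  intro i h1 h2
  rw [List.getElem_reverse]
  have := hp i h1
  rw [List.getD_eq_getElem _ _ h1,
    List.getD_eq_getElem _ _ (by omega : cs.length - 1 - i < cs.length)] at this
  exact this

lemma pv_getD_eraseIdx (cs : List Char) (i j : Nat) (d : Char) :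
    (cs.eraseIdx i).getD j d = if j < i then cs.getD j d else cs.getD (j+1) d := by
  simp only [List.getD_eq_getElem?_getD, List.getElem?_eraseIdx]
  split_ifs <;> rfl

-- stripping equal end characters preserves the one-deletion property
lemma pv_delPal_reduce (c : Char) (m : List Char) (hnp : ¬ (c :: m ++ [c] = (c :: m ++ [c]).reverse))
    (h : pvDelPal (c :: m ++ [c])) : pvDelPal m := by
  obtain ⟨i, hi, hp⟩ := h
  simp only [List.length_append, List.length_cons, List.length_nil] at hi
  rcases Nat.lt_or_ge i 1 with h0 | h1
  · have he : i = 0 := by omega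
    subst he
    rw [List.eraseIdx_append_of_lt_length (by simp), List.eraseIdx_cons_zero] at hp
    cases m with
    | nil => exact absurd (by simp) hnp
    | cons a m' =>
      rw [List.reverse_append, List.reverse_cons] at hp
      have h2 : a :: (m' ++ [c]) = c :: (m'.reverse ++ [a]) := by simpa using hp
      obtain ⟨rfl, htl⟩ := List.cons.injEq .. |>.mp h2
      have hm : m' = m'.reverse := (List.append_left_inj _).mp htl
      exact ⟨0, by simp, by simpa using hm⟩
  · rcases Nat.lt_or_ge i (m.length + 1) with hmid | hlast
    · obtain ⟨k, rfl⟩ : ∃ k, i = k + 1 := ⟨i-1, by omega⟩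
      have hk : k < m.length := by omega
      rw [List.eraseIdx_append_of_lt_length (by simp; omega), List.eraseIdx_cons_succ] at hp
      exact ⟨k, hk, (pv_pal_wrap c (m.eraseIdx k)).mp hp⟩
    · have he : i = m.length + 1 := by omega
      subst he
      rw [show m.length + 1 = (c :: m).length by simp,
        List.eraseIdx_append_of_length_le (le_refl _)] at hp
      simp only [Nat.sub_self, List.eraseIdx_zero, List.tail_cons, List.append_nil] at hp
      rcases List.eq_nil_or_concat m with rfl | ⟨m', a, rfl⟩
      · exact absurd (by simp) hnp
      · simp only [List.concat_eq_append] at hp ⊢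
        rw [← List.cons_append] at hp
        rw [List.reverse_append, List.reverse_cons] at hp
        have h2 : c :: (m' ++ [a]) = a :: (m'.reverse ++ [c]) := by simpa using hp
        obtain ⟨rfl, htl⟩ := List.cons.injEq .. |>.mp h2
        have hm : m' = m'.reverse := (List.append_left_inj _).mp htl
        refine ⟨m'.length, by simp, ?_⟩
        rw [List.eraseIdx_append_of_length_le (le_refl _)]
        simpa using hm

-- completeness of the two-pointer candidates: if some deletion works, deleting at the
-- first mismatch (either end of the window) works
lemma pv_key (L : Nat) : ∀ (cs : List Char),
    ¬ cs = cs.reverse →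
    (∀ k < L, cs.getD k ' ' = cs.getD (cs.length - 1 - k) ' ') →
    L < cs.length - 1 - L →
    cs.getD L ' ' ≠ cs.getD (cs.length - 1 - L) ' ' →
    pvDelPal cs →
    cs.eraseIdx L = (cs.eraseIdx L).reverse ∨
      cs.eraseIdx (cs.length - 1 - L) = (cs.eraseIdx (cs.length - 1 - L)).reverse := by
  induction L with
  | zero =>
    intro cs hnp hsym hL hmis hdel
    obtain ⟨i, hin, hp⟩ := hdel
    by_cases hi0 : i = 0
    · left; rw [← hi0]; exact hp
    · by_cases hin1 : i = cs.length - 1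
      · right; rw [show cs.length - 1 - 0 = i by omega]; exact hp
      · exfalso
        have hilt : i < cs.length - 1 := by omega
        have hlen : (cs.eraseIdx i).length = cs.length - 1 := by
          simp [List.length_eraseIdx, hin]
        have h00 := pv_pal_getD (cs.eraseIdx i) hp 0 (by omega) ' '
        rw [hlen] at h00
        rw [pv_getD_eraseIdx, pv_getD_eraseIdx] at h00
        rw [if_pos (by omega), if_neg (by omega)] at h00
        rw [show cs.length - 1 - 1 - 0 + 1 = cs.length - 1 - 0 by omega] at h00
        exact hmis h00
  | succ L' ih =>
    intro cs hnp hsym hL hmis hdel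
    have h2 : 2 ≤ cs.length := by omega
    obtain ⟨c, m, c', rfl⟩ := pv_two_split cs h2
    have hcc : c = c' := by
      have h0 := hsym 0 (by omega)
      rw [show (c :: m ++ [c']).length - 1 - 0 = m.length + 1 by simp] at h0
      rw [pv_getD_wrap_last] at h0
      simpa using h0
    subst hcc
    simp only [List.length_append, List.length_cons, List.length_nil] at hL hmis hsym ⊢
    have hnp_m : ¬ m = m.reverse := fun hm => hnp ((pv_pal_wrap c m).mpr hm)
    have hsym_m : ∀ k < L', m.getD k ' ' = m.getD (m.length - 1 - k) ' ' := by
      intro k hk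
      have hs := hsym (k+1) (by omega)
      rw [pv_getD_wrap c c m k (by omega) ' '] at hs
      rw [show m.length + 1 + 1 - 1 - (k+1) = (m.length - 1 - k) + 1 by omega] at hs
      rw [pv_getD_wrap c c m (m.length - 1 - k) (by omega) ' '] at hs
      exact hs
    have hL_m : L' < m.length - 1 - L' := by omega
    have hmis_m : m.getD L' ' ' ≠ m.getD (m.length - 1 - L') ' ' := by
      intro hmm
      apply hmis
      rw [pv_getD_wrap c c m L' (by omega) ' ']
      rw [show m.length + 1 + 1 - 1 - (L'+1) = (m.length - 1 - L') + 1 by omega]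
      rw [pv_getD_wrap c c m (m.length - 1 - L') (by omega) ' ']
      exact hmm
    have hdel_m := pv_delPal_reduce c m hnp hdel
    rcases ih m hnp_m hsym_m hL_m hmis_m hdel_m with hres | hres
    · left
      rw [List.eraseIdx_append_of_lt_length (by simp; omega), List.eraseIdx_cons_succ]
      exact (pv_pal_wrap c _).mpr hres
    · right
      rw [show m.length + 1 + 1 - 1 - (L'+1) = (m.length - 1 - L') + 1 by omega]
      rw [List.eraseIdx_append_of_lt_length (by simp; omega), List.eraseIdx_cons_succ]
      exact (pv_pal_wrap c _).mpr hres

-- spec of the two-pointer scan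
lemma pv_findB_spec (cs : List Char) (l : Nat)
    (h1 : ∀ k < l, cs.getD k ' ' = cs.getD (cs.length - 1 - k) ' ')
    (h2 : ∃ k0, l ≤ k0 ∧ k0 < cs.length - 1 - k0 ∧ cs.getD k0 ' ' ≠ cs.getD (cs.length - 1 - k0) ' ') :
    ∃ L : Nat, pvFindB cs (l : Int) ((cs.length - 1 - l : Nat) : Int) = ((L : Int), ((cs.length - 1 - L : Nat) : Int)) ∧
      l ≤ L ∧ L < cs.length - 1 - L ∧
      (∀ k < L, cs.getD k ' ' = cs.getD (cs.length - 1 - k) ' ') ∧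
      cs.getD L ' ' ≠ cs.getD (cs.length - 1 - L) ' ' := by
  have H : ∀ (fuel l : Nat), cs.length - l ≤ fuel →
      (∀ k < l, cs.getD k ' ' = cs.getD (cs.length - 1 - k) ' ') →
      (∃ k0, l ≤ k0 ∧ k0 < cs.length - 1 - k0 ∧ cs.getD k0 ' ' ≠ cs.getD (cs.length - 1 - k0) ' ') →
      ∃ L : Nat, pvFindB cs (l : Int) ((cs.length - 1 - l : Nat) : Int) = ((L : Int), ((cs.length - 1 - L : Nat) : Int)) ∧
        l ≤ L ∧ L < cs.length - 1 - L ∧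
        (∀ k < L, cs.getD k ' ' = cs.getD (cs.length - 1 - k) ' ') ∧
        cs.getD L ' ' ≠ cs.getD (cs.length - 1 - L) ' ' := by
    intro fuel
    induction fuel with
    | zero =>
      intro l hf h1 h2
      obtain ⟨k0, hk0l, hk0, _⟩ := h2
      omega
    | succ fuel ih =>
      intro l hf h1 h2
      obtain ⟨k0, hk0l, hk0, hk0m⟩ := h2
      have hl : l < cs.length - 1 - l := by omega
      have hlr : (l : Int) < ((cs.length - 1 - l : Nat) : Int) := by omega
      rw [pvFindB, if_pos hlr]
      by_cases heq : cs.getD l ' ' = cs.getD (cs.length - 1 - l) ' '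
      · have hbeq : (PySem.List.pyGetD cs (l : Int) ' ' == PySem.List.pyGetD cs ((cs.length - 1 - l : Nat) : Int) ' ') = true := by
          simp only [PySem.List.pyGetD_natCast, beq_iff_eq]
          exact heq
        rw [if_pos hbeq]
        have e1 : (l : Int) + 1 = ((l + 1 : Nat) : Int) := by push_cast; ring
        have e2 : ((cs.length - 1 - l : Nat) : Int) - 1 = ((cs.length - 1 - (l+1) : Nat) : Int) := by omega
        rw [e1, e2]
        have h1' : ∀ k < l + 1, cs.getD k ' ' = cs.getD (cs.length - 1 - k) ' ' := by
          intro k hk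
          rcases Nat.lt_or_ge k l with hlt | hge
          · exact h1 k hlt
          · have : k = l := by omega
            rw [this]; exact heq
        have hk0ne : k0 ≠ l := fun e => hk0m (e ▸ heq)
        obtain ⟨L, he, hle, hlt, hsym', hmis'⟩ := ih (l+1) (by omega) h1' ⟨k0, by omega, hk0, hk0m⟩
        exact ⟨L, he, by omega, hlt, hsym', hmis'⟩
      · have hbeq : (PySem.List.pyGetD cs (l : Int) ' ' == PySem.List.pyGetD cs ((cs.length - 1 - l : Nat) : Int) ' ') = false := by
          simp only [PySem.List.pyGetD_natCast, beq_eq_false_iff_ne, ne_eq]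
          exact heq
        rw [hbeq]
        exact ⟨l, by simp, le_refl l, hl, h1, heq⟩
  exact H cs.length l (by omega) h1 h2

-- symmetric sandwich: equal-ends wrapper does not affect palindromicity
lemma pv_sandwich (w mseg u : List Char) (h : u.reverse = w) :
    (w ++ mseg ++ u = (w ++ mseg ++ u).reverse) ↔ (mseg = mseg.reverse) := by
  have hw : w.reverse = u := by rw [← h, List.reverse_reverse]
  have key : (w ++ mseg ++ u).reverse = w ++ mseg.reverse ++ u := by
    rw [List.reverse_append, List.reverse_append, h, hw]
    simp [List.append_assoc]
  rw [key]
  simp [List.append_assoc]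

-- under prefix symmetry up to L, the suffix mirrors the prefix
lemma pv_suffix_rev (cs : List Char) (L : Nat) (hL : L < cs.length - 1 - L)
    (hsym : ∀ k < L, cs.getD k ' ' = cs.getD (cs.length - 1 - k) ' ') :
    (cs.drop (cs.length - L)).reverse = cs.take L := by
  have hlen : (cs.drop (cs.length - L)).length = L := by simp; omega
  apply List.ext_getElem (by simp; omega)
  intro j h1 h2
  have hj : j < L := by simpa [hlen] using h1
  rw [List.getElem_reverse, List.getElem_take, List.getElem_drop]
  have hs := hsym j hj
  rw [List.getD_eq_getElem _ _ (by omega), List.getD_eq_getElem _ _ (by omega)] at hs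
  exact (getElem_congr_idx (by simp; omega)).trans hs.symm

-- window ↔ eraseIdx, left candidate
lemma pv_window_left (cs : List Char) (L : Nat) (hL : L < cs.length - 1 - L)
    (hsym : ∀ k < L, cs.getD k ' ' = cs.getD (cs.length - 1 - k) ' ') :
    ((cs.drop (L+1)).take (cs.length - 1 - L - L) = ((cs.drop (L+1)).take (cs.length - 1 - L - L)).reverse)
      ↔ (cs.eraseIdx L = (cs.eraseIdx L).reverse) := by
  have hdec : cs.eraseIdx L = cs.take L ++ ((cs.drop (L+1)).take (cs.length - 1 - L - L) ++ cs.drop (cs.length - L)) := by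
    have hsplit : cs.drop (L+1) = (cs.drop (L+1)).take (cs.length - 1 - L - L) ++ cs.drop (cs.length - L) := by
      conv_lhs => rw [← List.take_append_drop (cs.length - 1 - L - L) (cs.drop (L+1))]
      rw [List.drop_drop, show L + 1 + (cs.length - 1 - L - L) = cs.length - L from by omega]
    rw [List.eraseIdx_eq_take_drop_succ]
    congr 1
  rw [hdec, ← List.append_assoc]
  exact (pv_sandwich _ _ _ (pv_suffix_rev cs L hL hsym)).symm

-- window ↔ eraseIdx, right candidate
lemma pv_window_right (cs : List Char) (L : Nat) (hL : L < cs.length - 1 - L)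
    (hsym : ∀ k < L, cs.getD k ' ' = cs.getD (cs.length - 1 - k) ' ') :
    ((cs.drop L).take (cs.length - 1 - L - L) = ((cs.drop L).take (cs.length - 1 - L - L)).reverse)
      ↔ (cs.eraseIdx (cs.length - 1 - L) = (cs.eraseIdx (cs.length - 1 - L)).reverse) := by
  have hdec : cs.eraseIdx (cs.length - 1 - L) = cs.take L ++ ((cs.drop L).take (cs.length - 1 - L - L) ++ cs.drop (cs.length - L)) := by
    have htake : cs.take (cs.length - 1 - L) = cs.take L ++ (cs.drop L).take (cs.length - 1 - L - L) := by
      conv_lhs => rw [show cs.length - 1 - L = L + (cs.length - 1 - L - L) from by omega]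
      rw [List.take_add]
    rw [List.eraseIdx_eq_take_drop_succ, htake,
      show cs.length - 1 - L + 1 = cs.length - L from by omega, List.append_assoc]
  rw [hdec, ← List.append_assoc]
  exact (pv_sandwich _ _ _ (pv_suffix_rev cs L hL hsym)).symm

-- A's even-split guard only fires on palindromes
lemma pv_guard_even (cs : List Char) (k : Nat) (h : cs.take k = (cs.drop k).reverse) :
    cs = cs.reverse := by
  have h2 : (cs.take k).reverse = cs.drop k := by rw [h, List.reverse_reverse]
  have h3 : cs.reverse = (cs.take k ++ cs.drop k).reverse := by rw [List.take_append_drop]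
  rw [h3, List.reverse_append, ← h, h2, List.take_append_drop]

-- A's odd-split guard only fires on palindromes
lemma pv_guard_odd (cs : List Char) (k : Nat) (hk : k < cs.length)
    (h : cs.take k = (cs.drop (k+1)).reverse) : cs = cs.reverse := by
  have h2 : (cs.take k).reverse = cs.drop (k+1) := by rw [h, List.reverse_reverse]
  have hd : cs.drop k = cs[k] :: cs.drop (k+1) := List.drop_eq_getElem_cons hk
  have h3 : cs.reverse = (cs.take k ++ cs.drop k).reverse := by rw [List.take_append_drop]
  rw [h3, List.reverse_append, hd, List.reverse_cons, ← h, h2]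
  calc cs = cs.take k ++ cs.drop k := (List.take_append_drop _ _).symm
    _ = cs.take k ++ (cs[k] :: cs.drop (k+1)) := by rw [hd]
    _ = (cs.take k ++ [cs[k]]) ++ cs.drop (k+1) := by simp

-- A's deletion loop tests exactly pvDelPal
lemma pv_anyA (cs : List Char) :
    ((PySem.List.pyRange 0 (cs.length : Int) 1).any (fun i =>
      let m := PySem.List.slice cs none (some i) ++ PySem.List.slice cs (some (i+1)) none
      m == m.reverse)) = true ↔ pvDelPal cs := by
  rw [List.any_eq_true]
  constructor
  · rintro ⟨i, hmem, hpred⟩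
    obtain ⟨h0, h1⟩ := (PySem.List.mem_pyRange_one).mp hmem
    obtain ⟨k, rfl⟩ : ∃ k : Nat, i = (k : Int) := ⟨i.toNat, (Int.toNat_of_nonneg h0).symm⟩
    simp only [PySem.List.slice_to_natCast] at hpred
    rw [show (k : Int) + 1 = ((k+1 : Nat) : Int) from by push_cast; ring,
      PySem.List.slice_from_natCast, beq_iff_eq] at hpred
    refine ⟨k, by omega, ?_⟩
    rwa [List.eraseIdx_eq_take_drop_succ]
  · rintro ⟨k, hk, hp⟩
    refine ⟨(k : Int), PySem.List.mem_pyRange_one.mpr ⟨by omega, by omega⟩, ?_⟩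
    simp only [PySem.List.slice_to_natCast]
    rw [show (k : Int) + 1 = ((k+1 : Nat) : Int) from by push_cast; ring,
      PySem.List.slice_from_natCast, beq_iff_eq]
    rwa [List.eraseIdx_eq_take_drop_succ] at hp

-- lists of length ≤ 1 are palindromes
lemma pv_short_pal (cs : List Char) (h : cs.length ≤ 1) : cs = cs.reverse := by
  match cs with
  | [] => rfl
  | [a] => rfl
  | a :: b :: t => simp at h

-- the two predicates agree
lemma pv_pred_eq (s : String) : pvIsNearA s = pvIsNearB s := by
  by_cases hpal : s.toList = s.toList.reverse
  · unfold pvIsNearA pvIsNearB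
    rw [if_pos (beq_iff_eq.mpr hpal),
      if_pos (beq_iff_eq.mpr hpal)]
  · have hn2 : 2 ≤ s.toList.length := by
      by_contra hlt
      exact hpal (pv_short_pal s.toList (by omega))
    obtain ⟨L, hfind, _, hLlt, hsymL, hmisL⟩ := pv_findB_spec s.toList 0
      (fun k hk => absurd hk (Nat.not_lt_zero k))
      (by obtain ⟨k, hk1, hk2⟩ := pv_mismatch_of_not_pal s.toList hpal
          exact ⟨k, Nat.zero_le k, hk1, hk2⟩)
    rw [Bool.eq_iff_iff]
    have hA : pvIsNearA s = true ↔ pvDelPal s.toList := by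
      unfold pvIsNearA
      rw [if_neg (by simp [hpal])]
      have hfd : PySem.Int.floordiv (s.toList.length : Int) 2 = ((s.toList.length / 2 : Nat) : Int) := by
        exact_mod_cast PySem.Int.floordiv_natCast s.toList.length 2
      have hg1 : (PySem.List.slice s.toList none (some (PySem.Int.floordiv (s.toList.length : Int) 2)) ==
          (PySem.List.slice s.toList (some (PySem.Int.floordiv (s.toList.length : Int) 2)) none).reverse) = false := by
        rw [hfd, PySem.List.slice_to_natCast, PySem.List.slice_from_natCast, beq_eq_false_iff_ne]
        intro hEq
        exact hpal (pv_guard_even s.toList (s.toList.length / 2) hEq)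
      have hg2 : (PySem.List.slice s.toList none (some (PySem.Int.floordiv (s.toList.length : Int) 2)) ==
          (PySem.List.slice s.toList (some (PySem.Int.floordiv (s.toList.length : Int) 2 + 1)) none).reverse) = false := by
        rw [hfd, PySem.List.slice_to_natCast,
          show ((s.toList.length / 2 : Nat) : Int) + 1 = ((s.toList.length / 2 + 1 : Nat) : Int) from by push_cast; ring,
          PySem.List.slice_from_natCast, beq_eq_false_iff_ne]
        intro hEq
        exact hpal (pv_guard_odd s.toList (s.toList.length / 2) (by omega) hEq)
      simp only [hg1, hg2, Bool.false_eq_true, if_false, ite_self]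
      exact pv_anyA s.toList
    have hB : pvIsNearB s = true ↔
        (s.toList.eraseIdx L = (s.toList.eraseIdx L).reverse ∨
         s.toList.eraseIdx (s.toList.length - 1 - L) = (s.toList.eraseIdx (s.toList.length - 1 - L)).reverse) := by
      unfold pvIsNearB
      rw [if_neg (by simp [hpal])]
      have hcall : pvFindB s.toList 0 ((s.toList.length : Int) - 1) = ((L : Int), ((s.toList.length - 1 - L : Nat) : Int)) := by
        rw [show (0 : Int) = ((0 : Nat) : Int) from rfl,
          show (s.toList.length : Int) - 1 = ((s.toList.length - 1 - 0 : Nat) : Int) from by omega]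
        exact hfind
      rw [hcall]
      simp only []
      rw [show ((L : Int) + 1) = ((L + 1 : Nat) : Int) from by push_cast; ring,
        show (((s.toList.length - 1 - L : Nat) : Int)) + 1 = ((s.toList.length - 1 - L + 1 : Nat) : Int) from by push_cast; ring]
      rw [PySem.List.slice_natCast, PySem.List.slice_natCast]
      rw [show s.toList.length - 1 - L + 1 - (L + 1) = s.toList.length - 1 - L - L from by omega]
      simp only [Bool.or_eq_true, beq_iff_eq]
      rw [pv_window_left s.toList L hLlt hsymL, pv_window_right s.toList L hLlt hsymL]
    rw [hA, hB]
    constructor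
    · exact fun hdel => pv_key L s.toList hpal hsymL hLlt hmisL hdel
    · rintro (h | h)
      · exact ⟨L, by omega, h⟩
      · exact ⟨s.toList.length - 1 - L, by omega, h⟩

-- integer range shift
lemma pv_range_shift (a b : Int) :
    PySem.List.pyRange (a+1) (b+1) 1 = (PySem.List.pyRange a b 1).map (· + 1) := by
  have H : ∀ (μ : Nat) (a : Int), (b - a).toNat ≤ μ →
      PySem.List.pyRange (a+1) (b+1) 1 = (PySem.List.pyRange a b 1).map (· + 1) := by
    intro μ
    induction μ with
    | zero =>
      intro a h
      rw [PySem.List.pyRange_one_eq_nil (by omega), PySem.List.pyRange_one_eq_nil (by omega)]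
      rfl
    | succ μ ih =>
      intro a h
      by_cases hba : b ≤ a
      · rw [PySem.List.pyRange_one_eq_nil (by omega), PySem.List.pyRange_one_eq_nil (by omega)]
        rfl
      · rw [PySem.List.pyRange_one_cons (a := a+1) (b := b+1) (by omega), PySem.List.pyRange_one_cons (a := a) (b := b) (by omega), List.map_cons]
        rw [ih (a+1) (by omega)]
  exact H (b - a).toNat a (le_refl _)

-- indexed flatMap over a full range is a fold over tails
lemma pv_flatMap_tails {γ : Type} (xs : List String) (G : Int → List γ) (H : String → List String → List γ)
    (h : ∀ k : Nat, k < xs.length → G (k : Int) = H (xs.getD k "") (xs.drop (k+1))) :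
    (PySem.List.pyRange 0 (xs.length : Int) 1).flatMap G = pvTails H xs := by
  induction xs generalizing G with
  | nil => rw [PySem.List.pyRange_one_eq_nil (by simp)]; rfl
  | cons x t ih =>
    rw [show ((x :: t).length : Int) = (t.length : Int) + 1 from by simp,
      PySem.List.pyRange_one_cons (by omega), List.flatMap_cons]
    rw [show (0 : Int) + 1 = 0 + 1 from rfl, pv_range_shift 0 (t.length : Int), List.flatMap_map]
    rw [ih (fun i => G (i + 1)) ?_]
    · have h0 := h 0 (by simp)
      simp only [Nat.cast_zero] at h0
      rw [h0]
      rfl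
    · intro k hk
      show G ((k : Int) + 1) = H (t.getD k "") (t.drop (k+1))
      rw [show ((k : Int) + 1) = ((k+1 : Nat) : Int) from by push_cast; ring,
        h (k+1) (by simpa using hk)]
      simp

-- filtering before pairing = testing inside the pair loop
lemma pv_tails_filter (p : String → Bool) (xs : List String) :
    pvTails (fun x t => if p x then ((t.filter p).map (fun y => [x, y])) else []) xs
      = pvTails (fun x t => t.map (fun y => [x, y])) (xs.filter p) := by
  induction xs with
  | nil => rfl
  | cons x t ih => by_cases h : p x <;> simp [pvTails, h, ih]

-- ===== VERDICT (by name: the statement is the Claim_ definition above) =====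
theorem find_near_palindrome_pairs_spec : Claim_equal_find_near_palindrome_pairs := by
  intro strings _
  unfold Spec_find_near_palindrome_pairs
  have hA : find_near_palindrome_pairs strings
      = pvTails (fun x t => t.map (fun y => [x, y])) (strings.filter pvIsNearA) := by
    unfold find_near_palindrome_pairs
    simp only [PySem.List.foldl_append_if, PySem.List.foldl_append_eq_flatMap, List.nil_append]
    rw [pv_flatMap_tails strings _
      (fun x t => if pvIsNearA x then ((t.filter pvIsNearA).map (fun y => [x, y])) else []) ?hGA]
    · exact pv_tails_filter pvIsNearA strings
    case hGA =>
      intro k hk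
      simp only [PySem.List.pyGetD_natCast]
      by_cases hx : pvIsNearA (strings.getD k "")
      · simp only [hx, Bool.true_and, if_true]
        have hmap : (PySem.List.pyRange ((k+1 : Nat) : Int) (strings.length : Int) 1).map
            (fun j => PySem.List.pyGetD strings j "") = strings.drop (k+1) := by
          have := PySem.List.map_pyGetD_pyRange' (xs := strings) (d := "")
            (a := ((k+1 : Nat) : Int)) (by positivity)
          simpa using this
        rw [show ((k : Int) + 1) = ((k+1 : Nat) : Int) from by push_cast; ring, ← hmap,
          List.filter_map, List.map_map]
        rfl
      · simp only [hx, Bool.false_and]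
        simp
  have hB : find_near_palindrome_pairs_alt strings
      = pvTails (fun x t => t.map (fun y => [x, y])) (strings.filter pvIsNearB) := by
    unfold find_near_palindrome_pairs_alt
    simp only []
    rw [pv_flatMap_tails (strings.filter pvIsNearB) _ (fun x t => t.map (fun y => [x, y])) ?hGB]
    case hGB =>
      intro k hk
      simp only [PySem.List.pyGetD_natCast]
      have hmap : (PySem.List.pyRange ((k+1 : Nat) : Int) ((strings.filter pvIsNearB).length : Int) 1).map
          (fun j => PySem.List.pyGetD (strings.filter pvIsNearB) j "") = (strings.filter pvIsNearB).drop (k+1) := by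
        have := PySem.List.map_pyGetD_pyRange' (xs := strings.filter pvIsNearB) (d := "")
          (a := ((k+1 : Nat) : Int)) (by positivity)
        simpa using this
      rw [show ((k : Int) + 1) = ((k+1 : Nat) : Int) from by push_cast; ring, ← hmap, List.map_map]
      rfl
  rw [hA, hB, List.filter_congr (fun x _ => pv_pred_eq x)]
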